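-- pv_equiv track=rewrite | github.com/ish-u/courses | PythonPracticals/Practical_8/Practical_8.py | maxString
-- ===== SOURCE A (Python) =====
-- def maxString(l):
--     flag = True
--     for i in l:
--         if i.isnumeric():
--             flag = False
--             break
--     if flag:
--         max = l[0]
--         for i in l:
--             if max < i:
--                 max = i
--         return max
--     return "List contains other datatypes than String."
-- ===== SOURCE B (Python) =====
-- def maxString(l):
--     mx = l[0]
--     for x in l:
--         if x.isnumeric():
--             return "List contains other datatypes than String."
--         if mx < x:
--             mx = x
--     return mx
-- ===== Notes on version B (the rewrite author's own statement) =====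
-- stated objective: simpler
-- what changed: Fuses A's two staged passes (flag-setting numeric scan with break, then a separate running-max loop) into one loop that returns the error string immediately on a numeric element and otherwise maintains the running maximum; the flag disappears.
-- outside the precondition, e.g. on maxString([]): A raises IndexError, B raises IndexError
import Mathlib
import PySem

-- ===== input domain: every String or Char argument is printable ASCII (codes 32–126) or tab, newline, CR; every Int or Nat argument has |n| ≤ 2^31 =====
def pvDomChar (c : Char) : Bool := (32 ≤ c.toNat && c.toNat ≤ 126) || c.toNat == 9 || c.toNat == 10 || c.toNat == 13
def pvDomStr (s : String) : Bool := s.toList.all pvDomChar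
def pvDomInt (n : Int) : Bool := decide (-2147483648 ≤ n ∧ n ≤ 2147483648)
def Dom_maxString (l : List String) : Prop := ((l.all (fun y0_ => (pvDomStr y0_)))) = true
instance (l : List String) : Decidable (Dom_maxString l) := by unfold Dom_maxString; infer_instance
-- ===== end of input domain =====

-- ===== PORT A =====
-- B fuses A's two staged passes (numeric-scan flag, then a separate max loop) into one
-- early-returning loop with a running maximum; return values only (neither mutates l).
-- first loop of A: scan for a numeric element, breaking as soon as one is found
def maxStringFlag : List String → Bool
  | [] => true
  | i :: t => if PySem.Str.strIsdigit i then false else maxStringFlag t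

def maxString (l : List String) : String :=
  if maxStringFlag l then
    -- max = l[0]; for i in l: if max < i: max = i   (Pre_ excludes l = [], where l[0] raises)
    l.foldl (fun mx i => if mx < i then i else mx) (l.headD "")
  else "List contains other datatypes than String."

-- ===== PORT B =====
-- single loop: return the error string at the first numeric element, else update the running max
def maxStringGo : List String → String → String
  | [], mx => mx
  | x :: t, mx =>
      if PySem.Str.strIsdigit x then "List contains other datatypes than String."
      else maxStringGo t (if mx < x then x else mx)

def maxString_alt (l : List String) : String :=
  maxStringGo l (l.headD "")   -- mx = l[0]; l = [] raises IndexError, outside Pre_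

-- ===== PRECONDITION & SPEC =====
-- A raises on the empty list (IndexError at l[0] after the empty scan); B raises there too (its mx = l[0]).
def Pre_maxString (l : List String) : Prop := l ≠ []
instance (l : List String) : Decidable (Pre_maxString l) := by unfold Pre_maxString; infer_instance
def pvWitness_maxString : List String := (["ab", "a"])
def Spec_maxString (l : List String) (out : String) : Prop := out = maxString_alt l
instance (l : List String) (out : String) : Decidable (Spec_maxString l out) := by unfold Spec_maxString; infer_instance

-- ===== CLAIM (what is proved, stated in full; the proofs are below) =====
def Claim_equal_maxString : Prop := ∀ (l : List String), Dom_maxString l → Pre_maxString l → Spec_maxString l (maxString l)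

-- ===== LEMMAS AND PROOFS =====
theorem go_err (t : List String) (mx : String)
    (h : t.any PySem.Str.strIsdigit = true) :
    maxStringGo t mx = "List contains other datatypes than String." := by
  induction t generalizing mx with
  | nil => simp at h
  | cons x s ih =>
    rw [maxStringGo]
    by_cases hx : PySem.Str.strIsdigit x = true
    · simp [PySem.Str.strIsdigit] at hx; simp [hx]
    · simp only [List.any_cons, hx, Bool.false_or] at h
      simp only [Bool.not_eq_true] at hx
      simp [PySem.Str.strIsdigit] at hx
      simp [hx, ih _ h]

theorem go_fold (t : List String) (mx : String)
    (h : t.any PySem.Str.strIsdigit = false) :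
    maxStringGo t mx = t.foldl (fun mx i => if mx < i then i else mx) mx := by
  induction t generalizing mx with
  | nil => rfl
  | cons x s ih =>
    simp only [List.any_cons, Bool.or_eq_false_iff] at h
    have hx : PySem.Chars.strIsdigit x.toList = false := by
      have := h.1; simpa [PySem.Str.strIsdigit] using this
    rw [maxStringGo, List.foldl_cons, if_neg (by simp [hx]), ih _ h.2]

theorem flag_eq_not_any (l : List String) : maxStringFlag l = !(l.any PySem.Str.strIsdigit) := by
  induction l with
  | nil => rfl
  | cons i t ih => simp [maxStringFlag, List.any_cons, ih]

-- ===== VERDICT (by name: the statement is the Claim_ definition above) =====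
theorem maxString_spec : Claim_equal_maxString := by
  intro l _ hpre
  unfold Spec_maxString maxString maxString_alt
  rw [flag_eq_not_any]
  cases l with
  | nil => exact absurd rfl hpre
  | cons x t =>
    cases hany : (x :: t).any PySem.Str.strIsdigit with
    | true => simp [go_err _ _ hany]
    | false =>
      simp only [List.any_cons, Bool.or_eq_false_iff] at hany
      have hx : PySem.Chars.strIsdigit x.toList = false := by
        have := hany.1; simpa [PySem.Str.strIsdigit] using this
      simp only [List.any_cons, hany.1, hany.2, Bool.or_self, Bool.not_false, if_pos]
      rw [maxStringGo, if_neg (by simp [hx])]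
      rw [go_fold _ _ hany.2]
      simp [List.headD]
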